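-- pv_equiv track=rewrite | github.com/yesdeepakmittal/interview-corner | GeeksforGeeks/NumIsSparse.py | isSparse
-- ===== SOURCE A (Python) =====
-- def isSparse(n):
--     #Your code here
--     num = bin(n)[2:]
--     prev = num[0]
--     for i in num[1:]:
--         if i == '1' and prev == '1':
--             return 0
--         prev = i
--     return 1
-- ===== SOURCE B (Python) =====
-- def isSparse(n):
--     # bitwise adjacency test: sparse iff no two adjacent 1 bits in the magnitude
--     # (A scans bin(n)[2:], which for negatives tests the magnitude digits too)
--     m = abs(n)
--     return 1 if (m & (m >> 1)) == 0 else 0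
-- ===== Notes on version B (the rewrite author's own statement) =====
-- stated objective: idiomatic
-- what changed: Replaces building bin(n)[2:] and scanning it character by character with a single bitwise test abs(n) & (abs(n) >> 1) == 0.
import Mathlib
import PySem

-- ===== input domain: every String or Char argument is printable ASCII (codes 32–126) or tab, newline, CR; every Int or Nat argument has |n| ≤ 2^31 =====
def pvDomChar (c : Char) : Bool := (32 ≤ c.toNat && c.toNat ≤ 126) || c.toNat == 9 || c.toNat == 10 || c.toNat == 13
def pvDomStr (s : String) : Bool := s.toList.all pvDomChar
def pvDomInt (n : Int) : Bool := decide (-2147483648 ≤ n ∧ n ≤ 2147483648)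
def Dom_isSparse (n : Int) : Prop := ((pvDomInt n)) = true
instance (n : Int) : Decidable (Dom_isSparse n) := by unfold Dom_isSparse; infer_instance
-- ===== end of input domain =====

-- B replaces A's character scan of bin(n)[2:] with the single bitwise test abs(n) & (abs(n) >> 1) == 0.

-- ===== PORT A =====
-- binary digits of a natural number, most significant first (bin(m) for m > 0 is "0b" ++ these)
def pvBits (m : Nat) : List Char :=
  if _h : m = 0 then []
  else pvBits (m / 2) ++ [if m % 2 == 1 then '1' else '0']
decreasing_by exact Nat.div_lt_self (Nat.pos_of_ne_zero _h) (by omega)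

-- bin(n)[2:] as a char list: "0" for 0, digits for positives, 'b' ++ digits of |n| for negatives
-- (bin(-5) = "-0b101", so [2:] keeps the 'b'); exact for every Int
def pvBinDrop2 (n : Int) : List Char :=
  if n = 0 then ['0']
  else if n > 0 then pvBits n.natAbs
  else 'b' :: pvBits n.natAbs

-- the for-loop of A: prev is the previous char, returns 0 on the first adjacent '1','1' pair
def pvLoopA (prev : Char) : List Char → Int
  | [] => 1
  | c :: cs => if c == '1' && prev == '1' then 0 else pvLoopA c cs

def isSparse (n : Int) : Int :=
  let num := pvBinDrop2 n
  match num with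
  | [] => 1  -- unreachable: bin(n)[2:] is never empty
  | p :: rest => pvLoopA p rest

-- ===== PORT B =====
def isSparse_alt (n : Int) : Int :=
  let m := n.natAbs
  if m &&& (m >>> 1) == 0 then 1 else 0

-- ===== PRECONDITION & SPEC =====
def Spec_isSparse (n : Int) (out : Int) : Prop := out = isSparse_alt n
instance (n : Int) (out : Int) : Decidable (Spec_isSparse n out) := by unfold Spec_isSparse; infer_instance

-- ===== CLAIM (what is proved, stated in full; the proofs are below) =====
def Claim_equal_isSparse : Prop := ∀ (n : Int), Dom_isSparse n → Spec_isSparse n (isSparse n)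

-- ===== LEMMAS AND PROOFS =====

-- Bool adjacency predicate: the list contains two adjacent '1' characters
def pvAdj : List Char → Bool
  | a :: b :: t => (a == '1' && b == '1') || pvAdj (b :: t)
  | _ => false

theorem pvLoopA_eq_adj (cs : List Char) (prev : Char) :
    pvLoopA prev cs = if pvAdj (prev :: cs) then 0 else 1 := by
  induction cs generalizing prev with
  | nil => simp [pvLoopA, pvAdj]
  | cons c cs ih =>
    simp only [pvLoopA, pvAdj, ih c]
    by_cases h1 : c == '1'
    · by_cases h2 : prev == '1' <;> simp [h1, h2, Bool.and_comm]
    · simp [h1]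

theorem pvAdj_cons_not1 (c : Char) (l : List Char) (h : (c == '1') = false) :
    pvAdj (c :: l) = pvAdj l := by
  cases l with
  | nil => simp [pvAdj]
  | cons b t => simp [pvAdj, h]

theorem pvBits_getLast? (m : Nat) (h : m ≠ 0) :
    (pvBits m).getLast? = some (if m % 2 == 1 then '1' else '0') := by
  rw [pvBits]; simp [h]

theorem pvAdj_append_single (xs : List Char) (d : Char) :
    pvAdj (xs ++ [d]) = (pvAdj xs || (xs.getLast? == some '1' && d == '1')) := by
  induction xs with
  | nil => simp [pvAdj]
  | cons a xs ih =>
    cases xs with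
    | nil => simp [pvAdj]
    | cons b t =>
      simp only [List.cons_append, pvAdj] at *
      rw [ih]
      simp [Bool.or_assoc, List.getLast?]

theorem pvAdj_bits_iff (m : Nat) :
    pvAdj (pvBits m) = true ↔ ∃ i, m.testBit i = true ∧ m.testBit (i + 1) = true := by
  induction m using Nat.strong_induction_on with
  | _ m ih =>
    by_cases h0 : m = 0
    · subst h0; simp [pvBits, pvAdj]
    · rw [pvBits]; simp only [h0, dif_neg, not_false_iff]
      rw [pvAdj_append_single]
      by_cases h2 : m / 2 = 0
      · -- m = 1
        have hm1 : m = 1 := by omega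
        subst hm1
        simp [pvBits, pvAdj]
        intro i hi
        have : Nat.testBit 1 (i+1) = false := by
          simp [Nat.testBit_succ]
        simp [this]
      · have ih2 := ih (m / 2) (Nat.div_lt_self (Nat.pos_of_ne_zero h0) (by omega))
        rw [pvBits_getLast? _ h2]
        constructor
        · intro h
          rcases Bool.or_eq_true_iff.mp h with h | h
          · obtain ⟨i, h1, h2⟩ := ih2.mp h
            exact ⟨i + 1, by simpa [Nat.testBit_succ] using h1,
                   by simpa [Nat.testBit_succ] using h2⟩
          · -- last digit of bits(m/2) is bit 1 of m, d is bit 0 of m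
            refine ⟨0, ?_, ?_⟩
            · simp only [Bool.and_eq_true, beq_iff_eq] at h
              have := h.2
              split at this <;> simp_all [Nat.testBit_zero]
            · simp only [Bool.and_eq_true, beq_iff_eq] at h
              have := h.1
              split at this <;> simp_all [Nat.testBit_succ, Nat.testBit_zero]
        · rintro ⟨i, h1, hsucc⟩
          cases i with
          | zero =>
            apply Bool.or_eq_true_iff.mpr; right
            have e0 : m % 2 = 1 := by simpa [Nat.testBit_zero] using h1
            have e1 : m / 2 % 2 = 1 := by
              simpa [Nat.testBit_succ, Nat.testBit_zero] using hsucc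
            simp [e0, e1]
          | succ j =>
            apply Bool.or_eq_true_iff.mpr; left
            exact ih2.mpr ⟨j, by simpa [Nat.testBit_succ] using h1,
                               by simpa [Nat.testBit_succ] using hsucc⟩

theorem land_shift_eq_zero_iff (m : Nat) :
    (m &&& (m >>> 1)) = 0 ↔ ∀ i, (m.testBit i = true → m.testBit (i + 1) = false) := by
  constructor
  · intro h i hi
    by_contra hb
    have hb' : m.testBit (i + 1) = true := by
      cases hx : m.testBit (i + 1) <;> simp_all
    have : (m &&& (m >>> 1)).testBit i = true := by
      simp [Nat.testBit_shiftRight, hi]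
      simpa [Nat.add_comm] using hb'
    rw [h] at this; simp at this
  · intro h
    apply Nat.eq_of_testBit_eq
    intro i
    simp only [Nat.testBit_land, Nat.testBit_shiftRight, Nat.zero_testBit]
    cases hx : m.testBit i
    · simp
    · have := h i hx
      simp [Nat.add_comm 1 i, this]

theorem adj_iff_land (m : Nat) :
    pvAdj (pvBits m) = false ↔ (m &&& (m >>> 1)) = 0 := by
  rw [land_shift_eq_zero_iff]
  constructor
  · intro h i hi
    by_contra hb
    have hb' : m.testBit (i + 1) = true := by cases hx : m.testBit (i + 1) <;> simp_all
    have : pvAdj (pvBits m) = true := (pvAdj_bits_iff m).mpr ⟨i, hi, hb'⟩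
    simp_all
  · intro h
    cases hx : pvAdj (pvBits m)
    · rfl
    · obtain ⟨i, h1, h2⟩ := (pvAdj_bits_iff m).mp hx
      have := h i h1
      simp_all

theorem pvAdj_land (m : Nat) :
    (if pvAdj (pvBits m) then (0 : Int) else 1)
      = if (m &&& (m >>> 1) == 0) = true then 1 else 0 := by
  rcases adj_iff_land m with ⟨h1, h2⟩
  cases hx : pvAdj (pvBits m)
  · simp [h1 hx]
  · have : ¬ (m &&& (m >>> 1)) = 0 := by
      intro hz; rw [h2 hz] at hx; simp at hx
    simp [this]

-- ===== VERDICT (by name: the statement is the Claim_ definition above) =====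
theorem isSparse_spec : Claim_equal_isSparse := by
  intro n _
  unfold Spec_isSparse isSparse isSparse_alt pvBinDrop2
  by_cases h0 : n = 0
  · subst h0; decide
  · by_cases hp : n > 0
    · have hne : n.natAbs ≠ 0 := by omega
      have hbits : pvBits n.natAbs ≠ [] := by
        rw [pvBits]; simp [hne]
      rw [if_neg h0, if_pos hp]
      cases hb : pvBits n.natAbs with
      | nil => exact absurd hb hbits
      | cons p rest =>
        show pvLoopA p rest = if (n.natAbs &&& (n.natAbs >>> 1) == 0) = true then 1 else 0
        rw [pvLoopA_eq_adj, ← hb, pvAdj_land]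
    · rw [if_neg h0, if_neg hp]
      show pvLoopA 'b' (pvBits n.natAbs)
            = if (n.natAbs &&& (n.natAbs >>> 1) == 0) = true then 1 else 0
      rw [pvLoopA_eq_adj, pvAdj_cons_not1 _ _ (by decide), pvAdj_land]
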